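-- pv_equiv track=rewrite | github.com/vishnu2kmohan/mcp-server-langgraph | scripts/validators/validate_docker_image_contents.py | validate_required_directories
-- ===== SOURCE A (Python) =====
-- def validate_required_directories(copy_commands: list[str]) -> str | None:
--     """
--     Validate required directories are copied.
--
--     Required:
--     - src/ directory (application source code)
--     - tests/ directory (test suite)
--     - pyproject.toml (Python project configuration)
--
--     Per ADR-0053: scripts/ and deployments/ are NOT copied to the Docker image.
--     Meta-tests that require these directories run on the host, not in the container.
--
--     Returns:
--         Error message if validation fails, None if passes
--     """
--     required_items = {
--         "src/": False,
--         "tests/": False,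
--         "pyproject.toml": False,
--     }
--
--     for cmd in copy_commands:
--         for item in required_items:
--             if item in cmd:
--                 required_items[item] = True
--
--     missing_items = [item for item, found in required_items.items() if not found]
--
--     if missing_items:
--         return f"Required items not found in COPY commands: {', '.join(missing_items)}"
--
--     return None  # Success
-- ===== SOURCE B (Python) =====
-- def validate_required_directories(copy_commands: list[str]) -> str | None:
--     # Concatenate all COPY commands into one text, separated by NUL (which can
--     # never occur inside a required name), then do one substring search per
--     # required name on that single blob instead of scanning command-by-command.
--     blob = "\0".join(copy_commands)
--     missing = [item for item in ("src/", "tests/", "pyproject.toml") if item not in blob]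
--     if missing:
--         return f"Required items not found in COPY commands: {', '.join(missing)}"
--     return None
-- ===== Notes on version B (the rewrite author's own statement) =====
-- stated objective: alternative
-- what changed: Instead of A's per-command nested membership scan filling a mutable found-flag dict and a second collection pass, B concatenates all commands into one NUL-separated blob and performs a single substring search per required name on that blob (NUL cannot occur in a required name, so no match can span a command boundary).
import Mathlib
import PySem

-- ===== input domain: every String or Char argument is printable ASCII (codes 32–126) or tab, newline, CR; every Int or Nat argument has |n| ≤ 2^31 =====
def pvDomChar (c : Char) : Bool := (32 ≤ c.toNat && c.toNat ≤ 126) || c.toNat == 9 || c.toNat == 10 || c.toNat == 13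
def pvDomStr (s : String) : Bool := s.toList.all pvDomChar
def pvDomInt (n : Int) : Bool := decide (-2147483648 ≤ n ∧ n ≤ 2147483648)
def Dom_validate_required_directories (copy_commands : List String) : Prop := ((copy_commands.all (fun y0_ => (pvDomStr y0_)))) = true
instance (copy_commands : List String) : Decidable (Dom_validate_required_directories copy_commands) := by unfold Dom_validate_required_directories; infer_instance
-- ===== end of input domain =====

-- B replaces A's nested per-command membership scan over a mutable found-flag dict by a
-- different algorithm: concatenate all commands into one NUL-separated blob and do a single
-- substring search per required name on that blob (NUL never occurs in a required name).

-- ===== PORT A =====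
def validate_required_directories (copy_commands : List String) : Option String :=
  let required_items : PySem.Dict String Bool :=
    PySem.Dict.ofList [("src/", false), ("tests/", false), ("pyproject.toml", false)]
  let required_items := copy_commands.foldl
    (fun d cmd => d.keys.foldl
      (fun d' item => if PySem.Str.isIn item cmd then d'.insert item true else d') d)
    required_items
  let missing_items := (required_items.items.filter (fun p => !p.2)).map Prod.fst
  if missing_items ≠ [] then
    some ("Required items not found in COPY commands: " ++ PySem.Str.join ", " missing_items)
  else
    none

-- ===== PORT B =====
def validate_required_directories_alt (copy_commands : List String) : Option String :=
  let blob := PySem.Str.join "\x00" copy_commands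
  let missing := ["src/", "tests/", "pyproject.toml"].filter
    (fun item => !(PySem.Str.isIn item blob))
  if missing ≠ [] then
    some ("Required items not found in COPY commands: " ++ PySem.Str.join ", " missing)
  else
    none

-- ===== PRECONDITION & SPEC =====
def Spec_validate_required_directories (copy_commands : List String) (out : Option String) : Prop := out = validate_required_directories_alt copy_commands
instance (copy_commands : List String) (out : Option String) : Decidable (Spec_validate_required_directories copy_commands out) := by unfold Spec_validate_required_directories; infer_instance

-- ===== CLAIM (what is proved, stated in full; the proofs are below) =====
def Claim_equal_validate_required_directories : Prop := ∀ (copy_commands : List String), Dom_validate_required_directories copy_commands → Spec_validate_required_directories copy_commands (validate_required_directories copy_commands)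

-- ===== LEMMAS AND PROOFS =====

-- one outer-loop step of A, on a dict of the fixed shape: each flag gets OR'ed with "item in cmd"
lemma stepA_eq (cmd : String) (a b c : Bool) :
    (PySem.Dict.mk [("src/", a), ("tests/", b), ("pyproject.toml", c)]).keys.foldl
      (fun d' item => if PySem.Str.isIn item cmd then d'.insert item true else d')
      (PySem.Dict.mk [("src/", a), ("tests/", b), ("pyproject.toml", c)])
    = PySem.Dict.mk [("src/", a || PySem.Str.isIn "src/" cmd),
        ("tests/", b || PySem.Str.isIn "tests/" cmd),
        ("pyproject.toml", c || PySem.Str.isIn "pyproject.toml" cmd)] := by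
  simp [PySem.Dict.keys, List.foldl]
  split_ifs <;> simp_all <;> rfl

-- the whole outer fold, by induction generalizing the three flags
lemma foldA_eq (cmds : List String) (a b c : Bool) :
    cmds.foldl
      (fun d cmd => d.keys.foldl
        (fun d' item => if PySem.Str.isIn item cmd then d'.insert item true else d') d)
      (PySem.Dict.mk [("src/", a), ("tests/", b), ("pyproject.toml", c)])
    = PySem.Dict.mk [("src/", a || cmds.any (fun cmd => PySem.Str.isIn "src/" cmd)),
        ("tests/", b || cmds.any (fun cmd => PySem.Str.isIn "tests/" cmd)),
        ("pyproject.toml", c || cmds.any (fun cmd => PySem.Str.isIn "pyproject.toml" cmd))] := by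
  induction cmds generalizing a b c with
  | nil => simp
  | cons cmd rest ih =>
      rw [List.foldl_cons, stepA_eq, ih]
      simp [Bool.or_assoc]

-- an infix not containing the separator char lies entirely left or right of it
lemma infix_append_sep {l a b : List Char} {s : Char} (hs : s ∉ l) :
    l <:+: a ++ s :: b ↔ l <:+: a ∨ l <:+: b := by
  constructor
  · rintro ⟨t, u, htu⟩
    by_cases h1 : t.length + l.length ≤ a.length
    · left
      have hp : t ++ l <+: a ++ s :: b := ⟨u, by simpa [List.append_assoc] using htu⟩
      have hpa : t ++ l <+: a :=
        List.prefix_of_prefix_length_le hp (List.prefix_append a (s :: b)) (by simpa using h1)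
      exact List.IsInfix.trans ⟨t, [], by simp⟩ hpa.isInfix
    · by_cases h2 : a.length + 1 ≤ t.length
      · right
        have hlen := congrArg List.length htu
        simp at hlen
        have hsuf : l ++ u <:+ a ++ s :: b := ⟨t, by simpa [List.append_assoc] using htu⟩
        have hsb : l ++ u <:+ s :: b :=
          List.suffix_of_suffix_length_le hsuf (List.suffix_append a (s :: b))
            (by simp; omega)
        have hbb : l ++ u <:+ b :=
          List.suffix_of_suffix_length_le hsb (List.suffix_cons s b) (by simp; omega)
        exact List.IsInfix.trans ⟨[], u, by simp⟩ hbb.isInfix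
      · exfalso
        apply hs
        have hg := congrArg (fun xs => xs[a.length]?) htu
        simp only [List.append_assoc] at hg
        have hlen := congrArg List.length htu
        simp at hlen
        rw [List.getElem?_append_right (show t.length ≤ a.length by omega)] at hg
        rw [List.getElem?_append_left (show a.length - t.length < l.length by omega)] at hg
        rw [List.getElem?_append_right (le_refl a.length)] at hg
        simp at hg
        exact List.mem_of_getElem? hg
  · rintro (h | h)
    · exact List.IsInfix.trans h ⟨[], s :: b, rfl⟩
    · exact List.IsInfix.trans h ⟨a ++ [s], [], by simp⟩

-- an infix without NUL of a NUL-intercalated list of chunks is an infix of one chunk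
lemma infix_intercalate_nul {l : List Char} (hs : '\x00' ∉ l) (hl : l ≠ []) :
    ∀ (cs : List (List Char)), (l <:+: [('\x00' : Char)].intercalate cs ↔ ∃ c ∈ cs, l <:+: c) := by
  intro cs
  induction cs with
  | nil =>
      simp [List.intercalate]
      intro h
      exact hl h
  | cons c rest ih =>
      cases rest with
      | nil => simp [List.intercalate]
      | cons d r =>
          have hstep : [('\x00' : Char)].intercalate (c :: d :: r)
              = c ++ '\x00' :: [('\x00' : Char)].intercalate (d :: r) := by
            simp [List.intercalate, List.intersperse]
          rw [hstep, infix_append_sep hs, ih]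
          simp

-- "item in blob" for the NUL-joined blob is "item in some command", for a NUL-free nonempty item
lemma isIn_join_nul (item : String) (hs : '\x00' ∉ item.toList) (hl : item.toList ≠ [])
    (cmds : List String) :
    PySem.Str.isIn item (PySem.Str.join "\x00" cmds)
      = cmds.any (fun c => PySem.Str.isIn item c) := by
  rw [Bool.eq_iff_iff, PySem.Str.isIn_iff_infix, List.any_eq_true]
  have h0 : ("\x00" : String).toList = ['\x00'] := by decide
  have htl : (PySem.Str.join "\x00" cmds).toList
      = [('\x00' : Char)].intercalate (cmds.map String.toList) := by
    simp [PySem.Str.join, PySem.Chars.join, String.toList_ofList, h0]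
  rw [htl, infix_intercalate_nul hs hl]
  constructor
  · rintro ⟨cl, hc, hinf⟩
    obtain ⟨c, hcm, rfl⟩ := List.mem_map.mp hc
    exact ⟨c, hcm, (PySem.Str.isIn_iff_infix _ _).mpr hinf⟩
  · rintro ⟨c, hcm, hin⟩
    exact ⟨c.toList, List.mem_map_of_mem hcm, (PySem.Str.isIn_iff_infix _ _).mp hin⟩

-- ===== VERDICT (by name: the statement is the Claim_ definition above) =====
theorem validate_required_directories_spec : Claim_equal_validate_required_directories := by
  intro copy_commands _
  unfold Spec_validate_required_directories
  unfold validate_required_directories validate_required_directories_alt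
  have h0 : PySem.Dict.ofList [("src/", false), ("tests/", false), ("pyproject.toml", false)]
      = PySem.Dict.mk [("src/", false), ("tests/", false), ("pyproject.toml", false)] := by decide
  have e1 := isIn_join_nul "src/" (by decide) (by decide) copy_commands
  have e2 := isIn_join_nul "tests/" (by decide) (by decide) copy_commands
  have e3 := isIn_join_nul "pyproject.toml" (by decide) (by decide) copy_commands
  simp only [h0, foldA_eq, e1, e2, e3, List.filter]
  cases h1 : copy_commands.any (fun cmd => PySem.Str.isIn "src/" cmd) <;>
    cases h2 : copy_commands.any (fun cmd => PySem.Str.isIn "tests/" cmd) <;>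
      cases h3 : copy_commands.any (fun cmd => PySem.Str.isIn "pyproject.toml" cmd) <;>
        simp
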